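-- pv_equiv track=rewrite | github.com/mateic9/PythonCourse2024 | control.py | count_open_sequences
-- ===== SOURCE A (Python) =====
-- def count_open_sequences(board, player, length):
--     def is_open_sequence(line, start, length):
--         """
--         Check if the sequence of the specified length is open on both ends.
--         """
--         end = start + length
--         if start > 0 and end < len(line):
--             return line[start - 1] == 0 and line[end] == 0
--         return False
--
--     count = 0
--     rows, cols = len(board), len(board[0])
--
--     # Check horizontally
--     for row in range(rows):
--         for col in range(cols - length + 1):
--             window = board[row][col:col + length]
--             if window.count(player) == length and is_open_sequence(board[row], col, length):
--                 count += 1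
--
--     # Check vertically
--     for col in range(cols):
--         for row in range(rows - length + 1):
--             window = [board[row + i][col] for i in range(length)]
--             if window.count(player) == length:
--                 if (row > 0 and row + length < rows and board[row - 1][col] == 0 and board[row + length][col] == 0):
--                     count += 1
--
--
--     for row in range(rows - length + 1):
--         for col in range(cols - length + 1):
--             window = [board[row + i][col + i] for i in range(length)]
--             if window.count(player) == length:
--
--                 if (row > 0 and col > 0 and row + length < rows and col + length < cols and
--                         board[row - 1][col - 1] == 0 and board[row + length][col + length] == 0):
--                     count += 1
--
--
--     for row in range(length - 1, rows):
--         for col in range(cols - length + 1):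
--             window = [board[row - i][col + i] for i in range(length)]
--             if window.count(player) == length:
--                 if (row + 1 < rows and col > 0 and row - length + 1 >= 0 and col + length < cols and
--                         board[row + 1][col - 1] == 0 and board[row - length][col + length] == 0):
--                     count += 1
--
--     return count
-- ===== SOURCE B (Python) =====
-- def count_open_sequences(board, player, length):
--     rows, cols = len(board), len(board[0])
--     total = 0
--     for r in range(rows):
--         for c in range(cols):
--             for dr, dc in ((0, 1), (1, 0), (1, 1), (-1, 1)):
--                 br, bc = r - dr, c - dc
--                 ar, ac = r + length * dr, c + length * dc
--                 if not (0 <= br < rows and 0 <= bc < cols and 0 <= ar < rows and 0 <= ac < cols):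
--                     continue
--                 if board[br][bc] != 0 or board[ar][ac] != 0:
--                     continue
--                 if all(board[r + k * dr][c + k * dc] == player for k in range(length)):
--                     total += 1
--     return total
-- ===== Notes on version B (the rewrite author's own statement) =====
-- stated objective: alternative
-- what changed: One fused scan over all cells with a generic direction-vector probe (bounds + flanking zeros + all-equal walk) replaces A's four bespoke nested loop blocks that materialize window lists, slice rows and compare element counts.
-- intended difference: On boards where an all-player anti-diagonal run of the given length touches the top row with its lower-left and (wrapped) flank cells zero, A's negative index board[row-length] wraps to the LAST row and A counts the run as open although the cell above its upper-right end does not exist; B requires row-length >= 0 and does not count it, which is the intended meaning of 'open on both ends'. — e.g. on count_open_sequences([[0, 1, 0], [0, 0, 0]], 1, 1): A returns 2, B returns 1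
-- outside the precondition, e.g. on count_open_sequences([[0, 0], [0, 0], [0, 0]], 0, 0): A returns 12, B returns 11; on count_open_sequences([[0, 0, 1], [1, 1, 1], [1, 0, 0]], 0, -2): A returns 0, B returns 1; on count_open_sequences([[0, 1, 0], [0, 1, 0, 5]], 1, 1): A returns 3, B returns 2
import Mathlib
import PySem

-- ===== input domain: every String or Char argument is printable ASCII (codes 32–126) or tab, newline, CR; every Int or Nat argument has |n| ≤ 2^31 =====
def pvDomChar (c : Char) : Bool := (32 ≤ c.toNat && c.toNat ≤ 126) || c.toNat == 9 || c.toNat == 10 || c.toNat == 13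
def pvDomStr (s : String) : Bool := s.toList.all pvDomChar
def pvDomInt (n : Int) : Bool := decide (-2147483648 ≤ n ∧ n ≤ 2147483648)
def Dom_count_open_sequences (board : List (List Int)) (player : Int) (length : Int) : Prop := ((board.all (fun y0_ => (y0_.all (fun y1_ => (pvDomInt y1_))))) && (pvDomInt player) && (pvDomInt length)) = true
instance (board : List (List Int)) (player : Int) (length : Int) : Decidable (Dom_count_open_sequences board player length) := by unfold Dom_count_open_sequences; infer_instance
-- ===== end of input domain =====

-- B replaces A's four bespoke nested loop blocks by one fused scan over all cells with a
-- generic direction-vector probe (objective: alternative decomposition, same asymptotic cost).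

-- ===== PORT A =====
-- board[i] (Python indexing incl. negative wrap); default [] is never reached on Pre_ inputs
def pvRow (board : List (List Int)) (i : Int) : List Int := PySem.List.pyGetD board i []
-- board[r][c]; defaults are never reached on Pre_ inputs
def pvCell (board : List (List Int)) (r c : Int) : Int := PySem.List.pyGetD (pvRow board r) c 0

-- A's inner helper is_open_sequence
def pvIsOpen (line : List Int) (start len : Int) : Bool :=
  let e := start + len
  if 0 < start ∧ e < (line.length : Int) then
    (PySem.List.pyGetD line (start - 1) 0 == 0) && (PySem.List.pyGetD line e 0 == 0)
  else false

def count_open_sequences (board : List (List Int)) (player : Int) (length : Int) : Int :=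
  let rows : Int := board.length
  let cols : Int := ((pvRow board 0).length : Int)
  let count0 : Int := 0
  -- Check horizontally
  let count1 := (PySem.List.pyRange 0 rows 1).foldl (fun cnt row =>
    (PySem.List.pyRange 0 (cols - length + 1) 1).foldl (fun cnt col =>
      let window := PySem.List.slice (pvRow board row) (some col) (some (col + length))
      if ((window.count player : Int) == length) && pvIsOpen (pvRow board row) col length
      then cnt + 1 else cnt) cnt) count0
  -- Check vertically
  let count2 := (PySem.List.pyRange 0 cols 1).foldl (fun cnt col =>
    (PySem.List.pyRange 0 (rows - length + 1) 1).foldl (fun cnt row =>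
      let window := (PySem.List.pyRange 0 length 1).map (fun i => pvCell board (row + i) col)
      if ((window.count player : Int) == length) then
        if decide (0 < row ∧ row + length < rows ∧ pvCell board (row - 1) col = 0 ∧ pvCell board (row + length) col = 0)
        then cnt + 1 else cnt
      else cnt) cnt) count1
  -- diagonal (down-right)
  let count3 := (PySem.List.pyRange 0 (rows - length + 1) 1).foldl (fun cnt row =>
    (PySem.List.pyRange 0 (cols - length + 1) 1).foldl (fun cnt col =>
      let window := (PySem.List.pyRange 0 length 1).map (fun i => pvCell board (row + i) (col + i))
      if ((window.count player : Int) == length) then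
        if decide (0 < row ∧ 0 < col ∧ row + length < rows ∧ col + length < cols ∧
            pvCell board (row - 1) (col - 1) = 0 ∧ pvCell board (row + length) (col + length) = 0)
        then cnt + 1 else cnt
      else cnt) cnt) count2
  -- anti-diagonal (up-right)
  let count4 := (PySem.List.pyRange (length - 1) rows 1).foldl (fun cnt row =>
    (PySem.List.pyRange 0 (cols - length + 1) 1).foldl (fun cnt col =>
      let window := (PySem.List.pyRange 0 length 1).map (fun i => pvCell board (row - i) (col + i))
      if ((window.count player : Int) == length) then
        if decide (row + 1 < rows ∧ 0 < col ∧ 0 ≤ row - length + 1 ∧ col + length < cols ∧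
            pvCell board (row + 1) (col - 1) = 0 ∧ pvCell board (row - length) (col + length) = 0)
        then cnt + 1 else cnt
      else cnt) cnt) count3
  count4

-- ===== PORT B =====
-- does a window of `L` player-cells start at (r,c) along (dr,dc), with both flanking
-- cells on the board and equal to 0?
def altOpenRun (board : List (List Int)) (player L rows cols r c dr dc : Int) : Bool :=
  if (0 ≤ r - dr ∧ r - dr < rows ∧ 0 ≤ c - dc ∧ c - dc < cols ∧
      0 ≤ r + L * dr ∧ r + L * dr < rows ∧ 0 ≤ c + L * dc ∧ c + L * dc < cols) then
    if (pvCell board (r - dr) (c - dc) ≠ 0 ∨ pvCell board (r + L * dr) (c + L * dc) ≠ 0) then false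
    else (PySem.List.pyRange 0 L 1).all (fun k => pvCell board (r + k * dr) (c + k * dc) == player)
  else false

def count_open_sequences_alt (board : List (List Int)) (player : Int) (length : Int) : Int :=
  let rows : Int := board.length
  let cols : Int := ((pvRow board 0).length : Int)
  (PySem.List.pyRange 0 rows 1).foldl (fun tot r =>
    (PySem.List.pyRange 0 cols 1).foldl (fun tot c =>
      ([((0 : Int), (1 : Int)), (1, 0), (1, 1), (-1, 1)]).foldl (fun tot d =>
        if altOpenRun board player length rows cols r c d.1 d.2 then tot + 1 else tot)
        tot) tot) 0

-- ===== PRECONDITION & SPEC =====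
-- Pre_ excludes the inputs where A raises IndexError (empty board, ragged boards it indexes out
-- of range), non-positive lengths (outside the natural domain: A's empty windows then count
-- unrelated pairs of zeros), and ragged boards that A scans only partially (an accident of its
-- row-0-based bounds); ragged boards whose cells A provably never touches (first row empty, or
-- length exceeding both dimensions) are admitted.
def Pre_count_open_sequences (board : List (List Int)) (player : Int) (length : Int) : Prop :=
  board ≠ [] ∧ 1 ≤ length ∧
  ((∀ row ∈ board, row.length = board.headI.length) ∨ board.headI.length = 0 ∨
   ((board.length : Int) < length ∧ (board.headI.length : Int) < length))
instance (board : List (List Int)) (player : Int) (length : Int) : Decidable (Pre_count_open_sequences board player length) := by unfold Pre_count_open_sequences; infer_instance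

def pvWitness_count_open_sequences : List (List Int) × Int × Int := ([[0, 1, 0], [0, 0, 0]], 1, 2)

-- On boards where an all-player anti-diagonal run of the given length touches the top row with its
-- lower-left flank and the wrapped cell board[-1][col+length] zero, A's negative index wraps to the
-- LAST row and A counts the run as open although the cell above its upper-right end does not exist;
-- B requires row - length >= 0 and does not count it, the intended meaning of "open on both ends".
def D_count_open_sequences (board : List (List Int)) (player : Int) (length : Int) : Prop :=
  1 ≤ length ∧ length < (board.length : Int) ∧
  ∃ c ∈ PySem.List.pyRange 1 ((board.headI.length : Int) - length) 1,
    (∀ i ∈ PySem.List.pyRange 0 length 1,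
        (board.getD (length - 1 - i).toNat []).getD (c + i).toNat 0 = player) ∧
    (board.getD length.toNat []).getD (c - 1).toNat 0 = 0 ∧
    (board.getD (board.length - 1) []).getD (c + length).toNat 0 = 0
instance (board : List (List Int)) (player : Int) (length : Int) : Decidable (D_count_open_sequences board player length) := by unfold D_count_open_sequences; infer_instance

def Spec_count_open_sequences (board : List (List Int)) (player : Int) (length : Int) (out : Int) : Prop := ¬ D_count_open_sequences board player length → out = count_open_sequences_alt board player length
instance (board : List (List Int)) (player : Int) (length : Int) (out : Int) : Decidable (Spec_count_open_sequences board player length out) := by unfold Spec_count_open_sequences; infer_instance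

def pvDiffWitness_count_open_sequences : List (List Int) × Int × Int := ([[0, 1, 0], [0, 0, 0]], 1, 1)
def pvDiffWitnessOut_count_open_sequences : Int × Int := (2, 1)

-- ===== CLAIM (what is proved, stated in full; the proofs are below) =====
def Claim_unchanged_count_open_sequences : Prop := ∀ (board : List (List Int)) (player : Int) (length : Int), Dom_count_open_sequences board player length → Pre_count_open_sequences board player length → Spec_count_open_sequences board player length (count_open_sequences board player length)
def Claim_changed_count_open_sequences : Prop := Dom_count_open_sequences (pvDiffWitness_count_open_sequences.1) (pvDiffWitness_count_open_sequences.2.1) (pvDiffWitness_count_open_sequences.2.2) ∧ Pre_count_open_sequences (pvDiffWitness_count_open_sequences.1) (pvDiffWitness_count_open_sequences.2.1) (pvDiffWitness_count_open_sequences.2.2) ∧ D_count_open_sequences (pvDiffWitness_count_open_sequences.1) (pvDiffWitness_count_open_sequences.2.1) (pvDiffWitness_count_open_sequences.2.2) ∧ count_open_sequences (pvDiffWitness_count_open_sequences.1) (pvDiffWitness_count_open_sequences.2.1) (pvDiffWitness_count_open_sequences.2.2) = pvDiffWitnessOut_count_open_sequences.1 ∧ count_open_sequences_alt (pvDiffWitness_count_open_sequences.1)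 (pvDiffWitness_count_open_sequences.2.1) (pvDiffWitness_count_open_sequences.2.2) = pvDiffWitnessOut_count_open_sequences.2 ∧ pvDiffWitnessOut_count_open_sequences.1 ≠ pvDiffWitnessOut_count_open_sequences.2
def Claim_exact_count_open_sequences : Prop := ∀ (board : List (List Int)) (player : Int) (length : Int), Dom_count_open_sequences board player length → Pre_count_open_sequences board player length → D_count_open_sequences board player length → count_open_sequences board player length ≠ count_open_sequences_alt board player length

-- ===== LEMMAS AND PROOFS =====

-- ---- generic counting toolkit ----

def pvInd (b : Bool) : Int := if b then 1 else 0

def pvSum (n : Int) (f : Int → Int) : Int := ((PySem.List.pyRange 0 n 1).map f).sum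

lemma pvInd_congr {a b : Bool} (h : a = true ↔ b = true) : pvInd a = pvInd b := by
  unfold pvInd; cases a <;> cases b <;> simp_all

lemma pvInd_false {b : Bool} (h : ¬ b = true) : pvInd b = 0 := by
  unfold pvInd; cases b <;> simp_all

lemma pvInd_nonneg (b : Bool) : 0 ≤ pvInd b := by
  unfold pvInd; cases b <;> simp

lemma foldl_ind (l : List Int) (P : Int → Bool) (a : Int) :
    l.foldl (fun acc x => if P x then acc + 1 else acc) a
      = a + (l.map (fun x => pvInd (P x))).sum := by
  induction l generalizing a with
  | nil => simp
  | cons x t ih =>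
      simp only [List.foldl_cons, List.map_cons, List.sum_cons]
      rw [ih]; unfold pvInd; split_ifs <;> ring

lemma foldl_ind2 (l : List Int) (P Q : Int → Bool) (a : Int) :
    l.foldl (fun acc x => if P x then (if Q x then acc + 1 else acc) else acc) a
      = a + (l.map (fun x => pvInd (P x && Q x))).sum := by
  induction l generalizing a with
  | nil => simp
  | cons x t ih =>
      simp only [List.foldl_cons, List.map_cons, List.sum_cons]
      rw [ih]; unfold pvInd
      by_cases h1 : P x = true <;> by_cases h2 : Q x = true <;> simp [h1, h2] <;> ring

lemma sum_map_add {α : Type} (l : List α) (f g : α → Int) :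
    (l.map (fun x => f x + g x)).sum = (l.map f).sum + (l.map g).sum := by
  induction l with
  | nil => simp
  | cons x t ih => simp only [List.map_cons, List.sum_cons]; rw [ih]; ring

lemma pvSum_congr (n : Int) (f g : Int → Int) (h : ∀ x, 0 ≤ x → x < n → f x = g x) :
    pvSum n f = pvSum n g := by
  unfold pvSum
  rw [List.map_congr_left]
  intro x hx
  exact h x ((PySem.List.mem_pyRange_one.mp hx).1) ((PySem.List.mem_pyRange_one.mp hx).2)

lemma pvSum_zero_of (n : Int) (f : Int → Int) (h : ∀ x, 0 ≤ x → x < n → f x = 0) :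
    pvSum n f = 0 := by
  unfold pvSum
  apply List.sum_eq_zero
  intro y hy
  obtain ⟨x, hx, rfl⟩ := List.mem_map.mp hy
  exact h x ((PySem.List.mem_pyRange_one.mp hx).1) ((PySem.List.mem_pyRange_one.mp hx).2)

lemma pvSum_nonpos (n : Int) (f : Int → Int) (h : n ≤ 0) : pvSum n f = 0 := by
  unfold pvSum
  rw [PySem.List.pyRange_one_eq_nil (by omega)]
  simp

lemma pvSum_trim (n m : Int) (f : Int → Int) (hmn : m ≤ n)
    (h : ∀ x, m ≤ x → x < n → f x = 0) :
    pvSum n f = pvSum m f := by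
  by_cases hm : 0 ≤ m
  · unfold pvSum
    rw [PySem.List.pyRange_one_append 0 m n hm hmn, List.map_append, List.sum_append]
    have hz : ((PySem.List.pyRange m n 1).map f).sum = 0 := by
      apply List.sum_eq_zero
      intro y hy
      obtain ⟨x, hx, rfl⟩ := List.mem_map.mp hy
      exact h x ((PySem.List.mem_pyRange_one.mp hx).1) ((PySem.List.mem_pyRange_one.mp hx).2)
    rw [hz, add_zero]
  · rw [pvSum_zero_of n f (fun x hx hxn => h x (by omega) hxn)]
    unfold pvSum
    rw [PySem.List.pyRange_one_eq_nil (by omega)]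
    simp

lemma pvSum_add (n : Int) (f g : Int → Int) :
    pvSum n (fun x => f x + g x) = pvSum n f + pvSum n g := by
  unfold pvSum; exact sum_map_add _ _ _

lemma sum_sum_swap (l l' : List Int) (f : Int → Int → Int) :
    (l.map (fun r => (l'.map (f r)).sum)).sum = (l'.map (fun c => (l.map (fun r => f r c)).sum)).sum := by
  induction l with
  | nil => simp [List.map_const']
  | cons x t ih =>
      simp only [List.map_cons, List.sum_cons]
      rw [ih, ← sum_map_add]

lemma pvSum_swap (n m : Int) (f : Int → Int → Int) :
    pvSum n (fun r => pvSum m (fun c => f r c)) = pvSum m (fun c => pvSum n (fun r => f r c)) := by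
  unfold pvSum; exact sum_sum_swap _ _ _

lemma pvSum_ind_nonneg (n : Int) (P : Int → Bool) :
    0 ≤ pvSum n (fun x => pvInd (P x)) := by
  unfold pvSum
  apply List.sum_nonneg
  intro y hy
  obtain ⟨x, hx, rfl⟩ := List.mem_map.mp hy
  exact pvInd_nonneg _

lemma pvSum_ind_pos (n : Int) (P : Int → Bool) (x : Int)
    (h0 : 0 ≤ x) (hx : x < n) (hP : P x = true) :
    1 ≤ pvSum n (fun y => pvInd (P y)) := by
  unfold pvSum
  rw [PySem.List.pyRange_one_append 0 x n h0 (by omega), List.map_append, List.sum_append,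
      PySem.List.pyRange_one_cons (by omega : x < n), List.map_cons, List.sum_cons]
  have h1 : 0 ≤ ((PySem.List.pyRange 0 x 1).map (fun y => pvInd (P y))).sum := pvSum_ind_nonneg x P
  have h2 : 0 ≤ ((PySem.List.pyRange (x + 1) n 1).map (fun y => pvInd (P y))).sum := by
    apply List.sum_nonneg
    intro y hy
    obtain ⟨z, hz, rfl⟩ := List.mem_map.mp hy
    exact pvInd_nonneg _
  have h3 : pvInd (P x) = 1 := by unfold pvInd; simp [hP]
  omega

-- ---- indexing facts ----

lemma pyGetD_nonneg_eq_getD {α : Type} (xs : List α) (i : Int) (d : α) (h : 0 ≤ i) :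
    PySem.List.pyGetD xs i d = xs.getD i.toNat d := by
  rw [← Int.toNat_of_nonneg h, PySem.List.pyGetD_natCast]
  simp
  rw [show (max i 0).toNat = i.toNat by omega]

lemma pvRow_zero (board : List (List Int)) (h : board ≠ []) : pvRow board 0 = board.headI := by
  cases board with
  | nil => exact absurd rfl h
  | cons hd tl => simp [pvRow, PySem.List.pyGetD_zero_cons]

lemma pvRow_len (board : List (List Int)) (r : Int)
    (hrect : ∀ row ∈ board, row.length = board.headI.length)
    (h0 : 0 ≤ r) (hr : r < (board.length : Int)) :
    (pvRow board r).length = board.headI.length := by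
  have hlt : r.toNat < board.length := by omega
  have hrow : pvRow board r = board[r.toNat] := by
    unfold pvRow
    rw [pyGetD_nonneg_eq_getD _ _ _ h0, List.getD_eq_getElem?_getD, List.getElem?_eq_getElem hlt]
    rfl
  rw [hrow]
  exact hrect _ (List.getElem_mem hlt)

-- window is all `player` iff its count is the window length
lemma count_all_iff (w : List Int) (p : Int) (L : Int) (hlen : w.length = L.toNat) (hL : 0 ≤ L) :
    ((w.count p : Int) = L) ↔ ∀ x ∈ w, x = p := by
  have h1 : ((w.count p : Int) = L) ↔ w.count p = w.length := by
    rw [hlen]; omega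
  rw [h1, List.count_eq_length]
  constructor
  · intro h x hx; have := h x hx; simpa [eq_comm] using this
  · intro h x hx; have := h x hx; simp [this]

-- count over a comprehension window [f(i) for i in range(L)]
lemma count_map_range_iff (f : Int → Int) (p L : Int) (hL : 0 ≤ L) :
    ((((PySem.List.pyRange 0 L 1).map f).count p : Int) = L) ↔ ∀ i, 0 ≤ i → i < L → f i = p := by
  rw [count_all_iff _ _ L (by rw [List.length_map, PySem.List.length_pyRange_one]; omega) hL]
  constructor
  · intro h i h0 hi
    exact h (f i) (List.mem_map.mpr ⟨i, PySem.List.mem_pyRange_one.mpr ⟨h0, hi⟩, rfl⟩)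
  · intro h x hx
    obtain ⟨i, hi, rfl⟩ := List.mem_map.mp hx
    exact h i (PySem.List.mem_pyRange_one.mp hi).1 (PySem.List.mem_pyRange_one.mp hi).2

-- count over a slice window line[a:a+L]
lemma count_slice_iff (ln : List Int) (p a L : Int) (h0 : 0 ≤ a) (hL : 0 ≤ L)
    (hle : a + L ≤ (ln.length : Int)) :
    (((PySem.List.slice ln (some a) (some (a + L))).count p : Int) = L)
      ↔ ∀ k, 0 ≤ k → k < L → PySem.List.pyGetD ln (a + k) 0 = p := by
  rw [PySem.List.slice_toNat ln h0 (by omega : 0 ≤ a + L),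
      show (a + L).toNat - a.toNat = L.toNat by omega]
  have hwlen : ((ln.drop a.toNat).take L.toNat).length = L.toNat := by
    rw [List.length_take, List.length_drop]; omega
  rw [count_all_iff _ _ L hwlen hL]
  constructor
  · intro h k hk0 hkL
    have hj : a.toNat + k.toNat < ln.length := by omega
    have hmem : ln[a.toNat + k.toNat]'hj ∈ (ln.drop a.toNat).take L.toNat := by
      rw [List.mem_iff_getElem?]
      refine ⟨k.toNat, ?_⟩
      rw [List.getElem?_take_of_lt (by omega), List.getElem?_drop,
          List.getElem?_eq_getElem hj]
    have hx := h _ hmem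
    rw [pyGetD_nonneg_eq_getD _ _ _ (by omega), List.getD_eq_getElem?_getD,
        show (a + k).toNat = a.toNat + k.toNat by omega, List.getElem?_eq_getElem hj]
    simpa using hx
  · intro h x hx
    obtain ⟨j, hj⟩ := List.mem_iff_getElem?.mp hx
    by_cases hjL : j < L.toNat
    · rw [List.getElem?_take_of_lt hjL, List.getElem?_drop] at hj
      have hjlen : a.toNat + j < ln.length := by omega
      rw [List.getElem?_eq_getElem hjlen] at hj
      have hk := h (j : Int) (by omega) (by omega)
      rw [pyGetD_nonneg_eq_getD _ _ _ (by omega), List.getD_eq_getElem?_getD,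
          show (a + (j : Int)).toNat = a.toNat + j by omega,
          List.getElem?_eq_getElem hjlen] at hk
      simp at hk
      cases hj
      exact hk
    · rw [List.getElem?_take] at hj
      rw [if_neg (by omega)] at hj
      exact absurd hj (by simp)

-- B's all(...) test
lemma all_range_iff (L : Int) (g : Int → Int) (p : Int) :
    ((PySem.List.pyRange 0 L 1).all (fun k => g k == p) = true) ↔ ∀ k, 0 ≤ k → k < L → g k = p := by
  rw [List.all_eq_true]
  constructor
  · intro h k h0 hk
    simpa using h _ (PySem.List.mem_pyRange_one.mpr ⟨h0, hk⟩)
  · intro h k hk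
    simp [h k (PySem.List.mem_pyRange_one.mp hk).1 (PySem.List.mem_pyRange_one.mp hk).2]

-- ---- the per-direction predicates of A ----

def pvPH (board : List (List Int)) (player L row col : Int) : Bool :=
  (((PySem.List.slice (pvRow board row) (some col) (some (col + L))).count player : Int) == L) &&
  pvIsOpen (pvRow board row) col L

def pvPV (board : List (List Int)) (player L R row col : Int) : Bool :=
  ((((PySem.List.pyRange 0 L 1).map (fun i => pvCell board (row + i) col)).count player : Int) == L) &&
  decide (0 < row ∧ row + L < R ∧ pvCell board (row - 1) col = 0 ∧ pvCell board (row + L) col = 0)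

def pvPD (board : List (List Int)) (player L R C row col : Int) : Bool :=
  ((((PySem.List.pyRange 0 L 1).map (fun i => pvCell board (row + i) (col + i))).count player : Int) == L) &&
  decide (0 < row ∧ 0 < col ∧ row + L < R ∧ col + L < C ∧
   pvCell board (row - 1) (col - 1) = 0 ∧ pvCell board (row + L) (col + L) = 0)

def pvPN (board : List (List Int)) (player L R C row col : Int) : Bool :=
  ((((PySem.List.pyRange 0 L 1).map (fun i => pvCell board (row - i) (col + i))).count player : Int) == L) &&
  decide (row + 1 < R ∧ 0 < col ∧ 0 ≤ row - L + 1 ∧ col + L < C ∧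
   pvCell board (row + 1) (col - 1) = 0 ∧ pvCell board (row - L) (col + L) = 0)

def pvExtra (board : List (List Int)) (player L : Int) : Int :=
  pvSum ((board.headI.length : Int) - L + 1)
    (fun col => pvInd (pvPN board player L (board.length : Int) (board.headI.length : Int) (L - 1) col))

lemma altOpenRun_iff (board : List (List Int)) (player L R C r c dr dc : Int) :
    altOpenRun board player L R C r c dr dc = true ↔
      ((0 ≤ r - dr ∧ r - dr < R ∧ 0 ≤ c - dc ∧ c - dc < C ∧
        0 ≤ r + L * dr ∧ r + L * dr < R ∧ 0 ≤ c + L * dc ∧ c + L * dc < C) ∧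
       pvCell board (r - dr) (c - dc) = 0 ∧ pvCell board (r + L * dr) (c + L * dc) = 0 ∧
       ∀ k, 0 ≤ k → k < L → pvCell board (r + k * dr) (c + k * dc) = player) := by
  unfold altOpenRun
  split_ifs with h1 h2
  · simp only [false_iff]
    rintro ⟨-, ha, hb, -⟩
    rcases h2 with h | h
    · exact h ha
    · exact h hb
  · rw [all_range_iff]
    constructor
    · intro h
      refine ⟨h1, ?_, ?_, h⟩
      · by_contra hne; exact h2 (Or.inl hne)
      · by_contra hne; exact h2 (Or.inr hne)
    · rintro ⟨-, -, -, h⟩; exact h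
  · simp only [false_iff]
    rintro ⟨hb, -⟩
    exact h1 hb

lemma bool_ite_add (b : Bool) (x : Int) : (if b then x + 1 else x) = x + pvInd b := by
  unfold pvInd; cases b <;> simp

-- ---- decomposition of the two ports ----

lemma A_eq (board : List (List Int)) (player L : Int) :
    count_open_sequences board player L =
      pvSum (board.length : Int) (fun row =>
        pvSum (((pvRow board 0).length : Int) - L + 1) (fun col => pvInd (pvPH board player L row col)))
    + pvSum ((pvRow board 0).length : Int) (fun col =>
        pvSum ((board.length : Int) - L + 1) (fun row => pvInd (pvPV board player L (board.length : Int) row col)))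
    + pvSum ((board.length : Int) - L + 1) (fun row =>
        pvSum (((pvRow board 0).length : Int) - L + 1) (fun col =>
          pvInd (pvPD board player L (board.length : Int) ((pvRow board 0).length : Int) row col)))
    + ((PySem.List.pyRange (L - 1) (board.length : Int) 1).map (fun row =>
        pvSum (((pvRow board 0).length : Int) - L + 1) (fun col =>
          pvInd (pvPN board player L (board.length : Int) ((pvRow board 0).length : Int) row col)))).sum := by
  unfold count_open_sequences pvSum pvPH pvPV pvPD pvPN
  simp only [foldl_ind, foldl_ind2, PySem.List.foldl_add, zero_add]

lemma B_eq (board : List (List Int)) (player L : Int) :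
    count_open_sequences_alt board player L =
      pvSum (board.length : Int) (fun r =>
        pvSum ((pvRow board 0).length : Int) (fun c =>
          pvInd (altOpenRun board player L (board.length : Int) ((pvRow board 0).length : Int) r c 0 1) +
          (pvInd (altOpenRun board player L (board.length : Int) ((pvRow board 0).length : Int) r c 1 0) +
           (pvInd (altOpenRun board player L (board.length : Int) ((pvRow board 0).length : Int) r c 1 1) +
            pvInd (altOpenRun board player L (board.length : Int) ((pvRow board 0).length : Int) r c (-1) 1))))) := by
  unfold count_open_sequences_alt pvSum
  simp only [List.foldl_cons, List.foldl_nil, bool_ite_add, add_assoc, PySem.List.foldl_add, zero_add]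


-- pvIsOpen characterization
lemma pvIsOpen_iff (ln : List Int) (s L : Int) :
    pvIsOpen ln s L = true ↔
      0 < s ∧ s + L < (ln.length : Int) ∧
      PySem.List.pyGetD ln (s - 1) 0 = 0 ∧ PySem.List.pyGetD ln (s + L) 0 = 0 := by
  simp only [pvIsOpen]
  split_ifs with h
  · simp only [Bool.and_eq_true, beq_iff_eq]
    constructor
    · rintro ⟨h1, h2⟩; exact ⟨h.1, h.2, h1, h2⟩
    · rintro ⟨-, -, h1, h2⟩; exact ⟨h1, h2⟩
  · simp only [false_iff]
    rintro ⟨h1, h2, -, -⟩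
    exact h ⟨h1, h2⟩

-- ---- pointwise equivalences of A's tests with B's probe ----

lemma ptH (board : List (List Int)) (player L r c : Int)
    (hrect : ∀ row ∈ board, row.length = board.headI.length) (hL : 1 ≤ L)
    (hr0 : 0 ≤ r) (hrR : r < (board.length : Int)) :
    pvPH board player L r c = true
      ↔ altOpenRun board player L (board.length : Int) (board.headI.length : Int) r c 0 1 = true := by
  have hlen : ((pvRow board r).length : Int) = (board.headI.length : Int) := by
    exact_mod_cast congrArg Nat.cast (pvRow_len board r hrect hr0 hrR)
  rw [altOpenRun_iff]
  simp only [pvPH, Bool.and_eq_true, beq_iff_eq, mul_zero, mul_one, add_zero, sub_zero]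
  rw [pvIsOpen_iff, hlen]
  constructor
  · rintro ⟨hcount, hs, hsl, hf1, hf2⟩
    rw [count_slice_iff _ _ _ _ (by omega) (by omega) (by rw [hlen]; omega)] at hcount
    exact ⟨⟨hr0, hrR, by omega, by omega, hr0, hrR, by omega, hsl⟩, hf1, hf2, hcount⟩
  · rintro ⟨⟨-, -, hb3, -, -, -, hb7, hb8⟩, hf1, hf2, hall⟩
    rw [count_slice_iff _ _ _ _ (by omega) (by omega) (by rw [hlen]; omega)]
    exact ⟨hall, by omega, hb8, hf1, hf2⟩

lemma ptV (board : List (List Int)) (player L r c : Int) (hL : 1 ≤ L)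
    (hc0 : 0 ≤ c) (hcC : c < (board.headI.length : Int)) :
    pvPV board player L (board.length : Int) r c = true
      ↔ altOpenRun board player L (board.length : Int) (board.headI.length : Int) r c 1 0 = true := by
  rw [altOpenRun_iff]
  simp only [pvPV, Bool.and_eq_true, beq_iff_eq, decide_eq_true_eq, mul_zero, mul_one,
    add_zero, sub_zero]
  rw [count_map_range_iff _ _ _ (by omega)]
  constructor
  · rintro ⟨hall, hr1, hr2, hf1, hf2⟩
    exact ⟨⟨by omega, by omega, hc0, hcC, by omega, hr2, hc0, hcC⟩, hf1, hf2, hall⟩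
  · rintro ⟨⟨hb1, -, -, -, -, hb6, -, -⟩, hf1, hf2, hall⟩
    exact ⟨hall, by omega, hb6, hf1, hf2⟩

lemma ptD (board : List (List Int)) (player L r c : Int) (hL : 1 ≤ L) :
    pvPD board player L (board.length : Int) (board.headI.length : Int) r c = true
      ↔ altOpenRun board player L (board.length : Int) (board.headI.length : Int) r c 1 1 = true := by
  rw [altOpenRun_iff]
  simp only [pvPD, Bool.and_eq_true, beq_iff_eq, decide_eq_true_eq, mul_one]
  rw [count_map_range_iff _ _ _ (by omega)]
  constructor
  · rintro ⟨hall, h1, h2, h3, h4, hf1, hf2⟩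
    exact ⟨⟨by omega, by omega, by omega, by omega, by omega, h3, by omega, h4⟩, hf1, hf2, hall⟩
  · rintro ⟨⟨hb1, -, hb3, -, -, hb6, -, hb8⟩, hf1, hf2, hall⟩
    exact ⟨hall, by omega, by omega, hb6, hb8, hf1, hf2⟩

lemma ptN (board : List (List Int)) (player L r c : Int) (hL : 1 ≤ L) (hrL : L ≤ r) :
    pvPN board player L (board.length : Int) (board.headI.length : Int) r c = true
      ↔ altOpenRun board player L (board.length : Int) (board.headI.length : Int) r c (-1) 1 = true := by
  rw [altOpenRun_iff]
  simp only [pvPN, Bool.and_eq_true, beq_iff_eq, decide_eq_true_eq, mul_neg_one, mul_one,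
    sub_neg_eq_add, ← sub_eq_add_neg]
  rw [count_map_range_iff _ _ _ (by omega)]
  constructor
  · rintro ⟨hall, h1, h2, -, h4, hf1, hf2⟩
    exact ⟨⟨by omega, h1, by omega, by omega, by omega, by omega, by omega, h4⟩, hf1, hf2, hall⟩
  · rintro ⟨⟨-, hb2, hb3, -, hb5, -, -, hb8⟩, hf1, hf2, hall⟩
    exact ⟨hall, hb2, by omega, by omega, hb8, hf1, hf2⟩

-- ---- the four direction lemmas (under Pre_) ----

lemma dirH (board : List (List Int)) (player L : Int)
    (hrect : ∀ row ∈ board, row.length = board.headI.length) (hL : 1 ≤ L) :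
    pvSum (board.length : Int) (fun row =>
        pvSum ((board.headI.length : Int) - L + 1) (fun col => pvInd (pvPH board player L row col)))
      = pvSum (board.length : Int) (fun r =>
          pvSum (board.headI.length : Int) (fun c =>
            pvInd (altOpenRun board player L (board.length : Int) (board.headI.length : Int) r c 0 1))) := by
  apply pvSum_congr
  intro r hr0 hrR
  rw [pvSum_trim (board.headI.length : Int) ((board.headI.length : Int) - L + 1)
      (fun c => pvInd (altOpenRun board player L (board.length : Int) (board.headI.length : Int) r c 0 1))
      (by omega)
      (fun c hc1 hc2 => pvInd_false (fun htrue => by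
        obtain ⟨⟨-, -, -, -, -, -, -, h8⟩, -⟩ :=
          (altOpenRun_iff board player L _ _ r c 0 1).mp htrue
        omega))]
  exact pvSum_congr _ _ _ (fun c hc0 hcC =>
    pvInd_congr (ptH board player L r c hrect hL hr0 hrR))

lemma dirV (board : List (List Int)) (player L : Int) (hL : 1 ≤ L) :
    pvSum (board.headI.length : Int) (fun col =>
        pvSum ((board.length : Int) - L + 1) (fun row => pvInd (pvPV board player L (board.length : Int) row col)))
      = pvSum (board.length : Int) (fun r =>
          pvSum (board.headI.length : Int) (fun c =>
            pvInd (altOpenRun board player L (board.length : Int) (board.headI.length : Int) r c 1 0))) := by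
  rw [pvSum_swap]
  rw [pvSum_trim (board.length : Int) ((board.length : Int) - L + 1)
      (fun r => pvSum (board.headI.length : Int) (fun c =>
        pvInd (altOpenRun board player L (board.length : Int) (board.headI.length : Int) r c 1 0)))
      (by omega)
      (fun r hr1 hr2 => pvSum_zero_of _ _ (fun c hc0 hcC => pvInd_false (fun htrue => by
        obtain ⟨⟨-, -, -, -, -, h6, -, -⟩, -⟩ :=
          (altOpenRun_iff board player L _ _ r c 1 0).mp htrue
        omega)))]
  exact pvSum_congr _ _ _ (fun r hr0 hrR =>
    pvSum_congr _ _ _ (fun c hc0 hcC =>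
      pvInd_congr (ptV board player L r c hL hc0 hcC)))

lemma dirD (board : List (List Int)) (player L : Int) (hL : 1 ≤ L) :
    pvSum ((board.length : Int) - L + 1) (fun row =>
        pvSum ((board.headI.length : Int) - L + 1) (fun col =>
          pvInd (pvPD board player L (board.length : Int) (board.headI.length : Int) row col)))
      = pvSum (board.length : Int) (fun r =>
          pvSum (board.headI.length : Int) (fun c =>
            pvInd (altOpenRun board player L (board.length : Int) (board.headI.length : Int) r c 1 1))) := by
  rw [pvSum_trim (board.length : Int) ((board.length : Int) - L + 1)
      (fun r => pvSum (board.headI.length : Int) (fun c =>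
        pvInd (altOpenRun board player L (board.length : Int) (board.headI.length : Int) r c 1 1)))
      (by omega)
      (fun r hr1 hr2 => pvSum_zero_of _ _ (fun c hc0 hcC => pvInd_false (fun htrue => by
        obtain ⟨⟨-, -, -, -, -, h6, -, -⟩, -⟩ :=
          (altOpenRun_iff board player L _ _ r c 1 1).mp htrue
        omega)))]
  apply pvSum_congr
  intro r hr0 hrR
  rw [pvSum_trim (board.headI.length : Int) ((board.headI.length : Int) - L + 1)
      (fun c => pvInd (altOpenRun board player L (board.length : Int) (board.headI.length : Int) r c 1 1))
      (by omega)
      (fun c hc1 hc2 => pvInd_false (fun htrue => by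
        obtain ⟨⟨-, -, -, -, -, -, -, h8⟩, -⟩ :=
          (altOpenRun_iff board player L _ _ r c 1 1).mp htrue
        omega))]
  exact pvSum_congr _ _ _ (fun c hc0 hcC => pvInd_congr (ptD board player L r c hL))

lemma dirN (board : List (List Int)) (player L : Int) (hL : 1 ≤ L) :
    ((PySem.List.pyRange (L - 1) (board.length : Int) 1).map (fun row =>
        pvSum ((board.headI.length : Int) - L + 1) (fun col =>
          pvInd (pvPN board player L (board.length : Int) (board.headI.length : Int) row col)))).sum
      = pvSum (board.length : Int) (fun r =>
          pvSum (board.headI.length : Int) (fun c =>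
            pvInd (altOpenRun board player L (board.length : Int) (board.headI.length : Int) r c (-1) 1)))
        + pvExtra board player L := by
  by_cases hRL : (board.length : Int) ≤ L - 1
  · rw [PySem.List.pyRange_one_eq_nil hRL]
    have hB : pvSum (board.length : Int) (fun r =>
        pvSum (board.headI.length : Int) (fun c =>
          pvInd (altOpenRun board player L (board.length : Int) (board.headI.length : Int) r c (-1) 1))) = 0 := by
      apply pvSum_zero_of
      intro r hr0 hrR
      apply pvSum_zero_of
      intro c hc0 hcC
      apply pvInd_false
      intro htrue
      obtain ⟨⟨-, -, -, -, h5, -, -, -⟩, -⟩ :=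
        (altOpenRun_iff board player L _ _ r c (-1) 1).mp htrue
      omega
    have hE : pvExtra board player L = 0 := by
      apply pvSum_zero_of
      intro c hc0 hcC
      apply pvInd_false
      intro htrue
      simp only [pvPN, Bool.and_eq_true, decide_eq_true_eq] at htrue
      omega
    rw [hB, hE]
    simp
  · have hsplit : PySem.List.pyRange (L - 1) (board.length : Int) 1
        = (L - 1) :: PySem.List.pyRange L (board.length : Int) 1 := by
      rw [PySem.List.pyRange_one_cons (by omega)]
      rw [show L - 1 + 1 = L by ring]
    rw [hsplit, List.map_cons, List.sum_cons]
    have hBsplit : pvSum (board.length : Int) (fun r =>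
        pvSum (board.headI.length : Int) (fun c =>
          pvInd (altOpenRun board player L (board.length : Int) (board.headI.length : Int) r c (-1) 1)))
        = ((PySem.List.pyRange L (board.length : Int) 1).map (fun r =>
            pvSum (board.headI.length : Int) (fun c =>
              pvInd (altOpenRun board player L (board.length : Int) (board.headI.length : Int) r c (-1) 1)))).sum := by
      unfold pvSum
      rw [PySem.List.pyRange_one_append 0 L (board.length : Int) (by omega) (by omega),
          List.map_append, List.sum_append]
      have hz : ((PySem.List.pyRange 0 L 1).map (fun r =>
          ((PySem.List.pyRange 0 (board.headI.length : Int) 1).map (fun c =>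
            pvInd (altOpenRun board player L (board.length : Int) (board.headI.length : Int) r c (-1) 1))).sum)).sum = 0 := by
        apply List.sum_eq_zero
        intro y hy
        obtain ⟨r, hr, rfl⟩ := List.mem_map.mp hy
        obtain ⟨hr0, hrL⟩ := PySem.List.mem_pyRange_one.mp hr
        apply List.sum_eq_zero
        intro z hz
        obtain ⟨c, hc, rfl⟩ := List.mem_map.mp hz
        apply pvInd_false
        intro htrue
        obtain ⟨⟨-, -, -, -, h5, -, -, -⟩, -⟩ :=
          (altOpenRun_iff board player L _ _ r c (-1) 1).mp htrue
        omega
      rw [hz, zero_add]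
    rw [hBsplit]
    have hrows : ((PySem.List.pyRange L (board.length : Int) 1).map (fun row =>
        pvSum ((board.headI.length : Int) - L + 1) (fun col =>
          pvInd (pvPN board player L (board.length : Int) (board.headI.length : Int) row col)))).sum
        = ((PySem.List.pyRange L (board.length : Int) 1).map (fun r =>
            pvSum (board.headI.length : Int) (fun c =>
              pvInd (altOpenRun board player L (board.length : Int) (board.headI.length : Int) r c (-1) 1)))).sum := by
      apply congrArg
      apply List.map_congr_left
      intro r hr
      obtain ⟨hrL, hrR⟩ := PySem.List.mem_pyRange_one.mp hr
      rw [pvSum_trim (board.headI.length : Int) ((board.headI.length : Int) - L + 1)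
          (fun c => pvInd (altOpenRun board player L (board.length : Int) (board.headI.length : Int) r c (-1) 1))
          (by omega)
          (fun c hc1 hc2 => pvInd_false (fun htrue => by
            obtain ⟨⟨-, -, -, -, -, -, -, h8⟩, -⟩ :=
              (altOpenRun_iff board player L _ _ r c (-1) 1).mp htrue
            omega))]
      exact pvSum_congr _ _ _ (fun c hc0 hcC => pvInd_congr (ptN board player L r c hL hrL))
    rw [hrows]
    have hextra : pvSum ((board.headI.length : Int) - L + 1) (fun col =>
        pvInd (pvPN board player L (board.length : Int) (board.headI.length : Int) (L - 1) col))
        = pvExtra board player L := rfl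
    rw [hextra]
    ring

-- ---- main decomposition: A = B + extra ----

lemma AB_decomp (board : List (List Int)) (player L : Int)
    (hpre : Pre_count_open_sequences board player L) :
    count_open_sequences board player L
      = count_open_sequences_alt board player L + pvExtra board player L := by
  obtain ⟨hne, hL, hdisj⟩ := hpre
  have hC : pvRow board 0 = board.headI := pvRow_zero board hne
  rcases hdisj with hrect | hC0 | ⟨hRL, hCL⟩
  · -- rectangular board: the four direction lemmas
    rw [A_eq, B_eq, hC]
    rw [dirH board player L hrect hL, dirV board player L hL,
        dirD board player L hL, dirN board player L hL]
    have hsplit : pvSum (board.length : Int) (fun r =>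
          pvSum ((board.headI.length : Int)) (fun c =>
            pvInd (altOpenRun board player L (board.length : Int) (board.headI.length : Int) r c 0 1) +
            (pvInd (altOpenRun board player L (board.length : Int) (board.headI.length : Int) r c 1 0) +
             (pvInd (altOpenRun board player L (board.length : Int) (board.headI.length : Int) r c 1 1) +
              pvInd (altOpenRun board player L (board.length : Int) (board.headI.length : Int) r c (-1) 1)))))
        = pvSum (board.length : Int) (fun r =>
            pvSum ((board.headI.length : Int)) (fun c => pvInd (altOpenRun board player L (board.length : Int) (board.headI.length : Int) r c 0 1)))
        + pvSum (board.length : Int) (fun r =>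
            pvSum ((board.headI.length : Int)) (fun c => pvInd (altOpenRun board player L (board.length : Int) (board.headI.length : Int) r c 1 0)))
        + pvSum (board.length : Int) (fun r =>
            pvSum ((board.headI.length : Int)) (fun c => pvInd (altOpenRun board player L (board.length : Int) (board.headI.length : Int) r c 1 1)))
        + pvSum (board.length : Int) (fun r =>
            pvSum ((board.headI.length : Int)) (fun c => pvInd (altOpenRun board player L (board.length : Int) (board.headI.length : Int) r c (-1) 1))) := by
      have step : ∀ r : Int,
          pvSum ((board.headI.length : Int)) (fun c =>
            pvInd (altOpenRun board player L (board.length : Int) (board.headI.length : Int) r c 0 1) +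
            (pvInd (altOpenRun board player L (board.length : Int) (board.headI.length : Int) r c 1 0) +
             (pvInd (altOpenRun board player L (board.length : Int) (board.headI.length : Int) r c 1 1) +
              pvInd (altOpenRun board player L (board.length : Int) (board.headI.length : Int) r c (-1) 1))))
          = pvSum ((board.headI.length : Int)) (fun c => pvInd (altOpenRun board player L (board.length : Int) (board.headI.length : Int) r c 0 1))
          + pvSum ((board.headI.length : Int)) (fun c => pvInd (altOpenRun board player L (board.length : Int) (board.headI.length : Int) r c 1 0))
          + pvSum ((board.headI.length : Int)) (fun c => pvInd (altOpenRun board player L (board.length : Int) (board.headI.length : Int) r c 1 1))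
          + pvSum ((board.headI.length : Int)) (fun c => pvInd (altOpenRun board player L (board.length : Int) (board.headI.length : Int) r c (-1) 1)) := by
        intro r
        rw [pvSum_add, pvSum_add, pvSum_add]; ring
      rw [pvSum_congr _ _ _ (fun r _ _ => step r), pvSum_add, pvSum_add, pvSum_add]
    rw [hsplit]; ring
  · -- first row empty: every loop range over columns is empty on both sides
    have h0 : ((board.headI.length : Int)) = 0 := by exact_mod_cast hC0
    rw [A_eq, B_eq, hC, h0]
    have e1 : pvSum (board.length : Int) (fun row =>
        pvSum ((0 : Int) - L + 1) (fun col => pvInd (pvPH board player L row col))) = 0 :=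
      pvSum_zero_of _ _ (fun r _ _ => pvSum_nonpos _ _ (by omega))
    have e2 : pvSum (0 : Int) (fun col =>
        pvSum ((board.length : Int) - L + 1) (fun row =>
          pvInd (pvPV board player L (board.length : Int) row col))) = 0 :=
      pvSum_nonpos _ _ le_rfl
    have e3 : pvSum ((board.length : Int) - L + 1) (fun row =>
        pvSum ((0 : Int) - L + 1) (fun col =>
          pvInd (pvPD board player L (board.length : Int) 0 row col))) = 0 :=
      pvSum_zero_of _ _ (fun r _ _ => pvSum_nonpos _ _ (by omega))
    have e4 : ((PySem.List.pyRange (L - 1) (board.length : Int) 1).map (fun row =>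
        pvSum ((0 : Int) - L + 1) (fun col =>
          pvInd (pvPN board player L (board.length : Int) 0 row col)))).sum = 0 := by
      apply List.sum_eq_zero
      intro y hy
      obtain ⟨r, hr, rfl⟩ := List.mem_map.mp hy
      exact pvSum_nonpos _ _ (by omega)
    have eB : pvSum (board.length : Int) (fun r =>
        pvSum (0 : Int) (fun c =>
          pvInd (altOpenRun board player L (board.length : Int) 0 r c 0 1) +
          (pvInd (altOpenRun board player L (board.length : Int) 0 r c 1 0) +
           (pvInd (altOpenRun board player L (board.length : Int) 0 r c 1 1) +
            pvInd (altOpenRun board player L (board.length : Int) 0 r c (-1) 1))))) = 0 :=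
      pvSum_zero_of _ _ (fun r _ _ => pvSum_nonpos _ _ le_rfl)
    have eE : pvExtra board player L = 0 := pvSum_nonpos _ _ (by omega)
    rw [e1, e2, e3, e4, eB, eE]
    simp
  · -- length exceeds both dimensions: no window fits on either side
    rw [A_eq, B_eq, hC]
    have e1 : pvSum (board.length : Int) (fun row =>
        pvSum ((board.headI.length : Int) - L + 1) (fun col => pvInd (pvPH board player L row col))) = 0 :=
      pvSum_zero_of _ _ (fun r _ _ => pvSum_nonpos _ _ (by omega))
    have e2 : pvSum (board.headI.length : Int) (fun col =>
        pvSum ((board.length : Int) - L + 1) (fun row =>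
          pvInd (pvPV board player L (board.length : Int) row col))) = 0 :=
      pvSum_zero_of _ _ (fun c _ _ => pvSum_nonpos _ _ (by omega))
    have e3 : pvSum ((board.length : Int) - L + 1) (fun row =>
        pvSum ((board.headI.length : Int) - L + 1) (fun col =>
          pvInd (pvPD board player L (board.length : Int) (board.headI.length : Int) row col))) = 0 :=
      pvSum_nonpos _ _ (by omega)
    have e4 : ((PySem.List.pyRange (L - 1) (board.length : Int) 1).map (fun row =>
        pvSum ((board.headI.length : Int) - L + 1) (fun col =>
          pvInd (pvPN board player L (board.length : Int) (board.headI.length : Int) row col)))).sum = 0 := by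
      rw [PySem.List.pyRange_one_eq_nil (by omega)]
      simp
    have eB : pvSum (board.length : Int) (fun r =>
        pvSum (board.headI.length : Int) (fun c =>
          pvInd (altOpenRun board player L (board.length : Int) (board.headI.length : Int) r c 0 1) +
          (pvInd (altOpenRun board player L (board.length : Int) (board.headI.length : Int) r c 1 0) +
           (pvInd (altOpenRun board player L (board.length : Int) (board.headI.length : Int) r c 1 1) +
            pvInd (altOpenRun board player L (board.length : Int) (board.headI.length : Int) r c (-1) 1))))) = 0 := by
      apply pvSum_zero_of
      intro r hr0 hrR
      apply pvSum_zero_of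
      intro c hc0 hcC
      rw [pvInd_false (fun htrue => by
            obtain ⟨⟨-, -, -, -, -, -, -, h8⟩, -⟩ :=
              (altOpenRun_iff board player L _ _ r c 0 1).mp htrue
            omega),
          pvInd_false (fun htrue => by
            obtain ⟨⟨-, -, -, -, -, h6, -, -⟩, -⟩ :=
              (altOpenRun_iff board player L _ _ r c 1 0).mp htrue
            omega),
          pvInd_false (fun htrue => by
            obtain ⟨⟨-, -, -, -, -, h6, -, -⟩, -⟩ :=
              (altOpenRun_iff board player L _ _ r c 1 1).mp htrue
            omega),
          pvInd_false (fun htrue => by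
            obtain ⟨⟨-, -, -, -, -, -, -, h8⟩, -⟩ :=
              (altOpenRun_iff board player L _ _ r c (-1) 1).mp htrue
            omega)]
      ring
    have eE : pvExtra board player L = 0 := pvSum_nonpos _ _ (by omega)
    rw [e1, e2, e3, e4, eB, eE]
    simp

-- ---- extra ↔ D ----

lemma pvCell_getD (board : List (List Int)) (r c : Int) (hr : 0 ≤ r) (hc : 0 ≤ c) :
    pvCell board r c = (board.getD r.toNat []).getD c.toNat 0 := by
  unfold pvCell pvRow
  rw [pyGetD_nonneg_eq_getD _ _ _ hr, pyGetD_nonneg_eq_getD _ _ _ hc]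

lemma pvCell_neg_one (board : List (List Int)) (hne : board ≠ []) (c : Int) (hc : 0 ≤ c) :
    pvCell board (-1) c = (board.getD (board.length - 1) []).getD c.toNat 0 := by
  unfold pvCell pvRow
  rw [PySem.List.pyGetD_neg_one board [] hne, pyGetD_nonneg_eq_getD _ _ _ hc]
  congr 1
  rw [List.getLast_eq_getElem, List.getD_eq_getElem?_getD,
      List.getElem?_eq_getElem (by
        have : board.length ≠ 0 := fun h => hne (List.eq_nil_of_length_eq_zero h)
        omega)]
  rfl

lemma topN_iff (board : List (List Int)) (player L col : Int)
    (hne : board ≠ []) (hL : 1 ≤ L) :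
    pvPN board player L (board.length : Int) (board.headI.length : Int) (L - 1) col = true ↔
      (L < (board.length : Int) ∧ 1 ≤ col ∧ col < (board.headI.length : Int) - L ∧
       (∀ i, 0 ≤ i → i < L → (board.getD (L - 1 - i).toNat []).getD (col + i).toNat 0 = player) ∧
       (board.getD L.toNat []).getD (col - 1).toNat 0 = 0 ∧
       (board.getD (board.length - 1) []).getD (col + L).toNat 0 = 0) := by
  simp only [pvPN, Bool.and_eq_true, beq_iff_eq, decide_eq_true_eq]
  rw [count_map_range_iff _ _ _ (by omega)]
  rw [show L - 1 + 1 = L by ring, show L - 1 - L = (-1 : Int) by ring]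
  constructor
  · rintro ⟨hall, h1, h2, -, h4, hf1, hf2⟩
    refine ⟨by omega, by omega, by omega, ?_, ?_, ?_⟩
    · intro i hi0 hiL
      rw [← pvCell_getD board _ _ (by omega) (by omega)]
      exact hall i hi0 hiL
    · rw [← pvCell_getD board _ _ (by omega) (by omega)]
      exact hf1
    · rw [← pvCell_neg_one board hne _ (by omega)]
      exact hf2
  · rintro ⟨hLR, hc1, hc2, hall, hf1, hf2⟩
    refine ⟨?_, by omega, by omega, by omega, by omega, ?_, ?_⟩
    · intro i hi0 hiL
      rw [pvCell_getD board _ _ (by omega) (by omega)]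
      exact hall i hi0 hiL
    · rw [pvCell_getD board _ _ (by omega) (by omega)]
      exact hf1
    · rw [pvCell_neg_one board hne _ (by omega)]
      exact hf2

lemma extra_pos_iff_D (board : List (List Int)) (player L : Int)
    (hne : board ≠ []) (hL : 1 ≤ L) :
    (1 ≤ pvExtra board player L ↔ D_count_open_sequences board player L) := by
  unfold D_count_open_sequences
  constructor
  · intro h1
    by_contra hD
    have hz : pvExtra board player L = 0 := by
      apply pvSum_zero_of
      intro col hc0 hcC
      apply pvInd_false
      intro htrue
      obtain ⟨hLR, hc1, hc2, hall, hf1, hf2⟩ :=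
        (topN_iff board player L col hne hL).mp htrue
      exact hD ⟨hL, hLR, col, PySem.List.mem_pyRange_one.mpr ⟨hc1, hc2⟩,
        (fun i hi => hall i (PySem.List.mem_pyRange_one.mp hi).1 (PySem.List.mem_pyRange_one.mp hi).2),
        hf1, hf2⟩
    omega
  · rintro ⟨hL1, hLR, c, hc, hall, hf1, hf2⟩
    obtain ⟨hc1, hc2⟩ := PySem.List.mem_pyRange_one.mp hc
    apply pvSum_ind_pos _ _ c (by omega) (by omega)
    rw [topN_iff board player L c hne hL]
    exact ⟨hLR, hc1, hc2,
      (fun i hi0 hiL => hall i (PySem.List.mem_pyRange_one.mpr ⟨hi0, hiL⟩)), hf1, hf2⟩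

lemma extra_zero_of_notD (board : List (List Int)) (player L : Int)
    (hne : board ≠ []) (hL : 1 ≤ L)
    (hD : ¬ D_count_open_sequences board player L) :
    pvExtra board player L = 0 := by
  have h1 : 0 ≤ pvExtra board player L := pvSum_ind_nonneg _ _
  have h2 : ¬ 1 ≤ pvExtra board player L := fun h =>
    hD ((extra_pos_iff_D board player L hne hL).mp h)
  omega

-- ===== VERDICT (by name: the statement is the Claim_ definition above) =====
theorem count_open_sequences_spec : Claim_unchanged_count_open_sequences := by
  intro board player length _ hpre
  unfold Spec_count_open_sequences
  intro hD
  obtain ⟨hne, hL, hdisj⟩ := hpre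
  rw [AB_decomp board player length ⟨hne, hL, hdisj⟩,
      extra_zero_of_notD board player length hne hL hD, add_zero]

theorem count_open_sequences_changed : Claim_changed_count_open_sequences := by
  unfold Claim_changed_count_open_sequences; decide

theorem count_open_sequences_tight : Claim_exact_count_open_sequences := by
  intro board player length _ hpre hD
  obtain ⟨hne, hL, hdisj⟩ := hpre
  have h1 := (extra_pos_iff_D board player length hne hL).mpr hD
  rw [AB_decomp board player length ⟨hne, hL, hdisj⟩]
  omega
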